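-- pv_equiv track=rewrite | github.com/MarcusJoha/IDATT2505-Sikkerhet-kryptografi | oblig7/oppg2.py | modulo_table_and_mult_invers
-- ===== SOURCE A (Python) =====
-- def modulo_table_and_mult_invers(n: int):
--     table = []
--     mult_pl_invers = []
--     for i in range(1,n):
--         row = []
--         for j in range(1,n):
--             calc = (i*j)%n
--             row.append(calc)
--             if calc == 1:
--                 mult_pl_invers.append("({}*{})%{} = 1 ".format(i,j,n))
--         table.append(row)
--     return table, mult_pl_invers
-- ===== SOURCE B (Python) =====
-- def modulo_table_and_mult_invers(n: int):
--     table = [[(i * j) % n for j in range(1, n)] for i in range(1, n)]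
--     mult_pl_invers = []
--     for i in range(1, n):
--         try:
--             inv = pow(i, -1, n)
--         except ValueError:
--             continue
--         mult_pl_invers.append("({}*{})%{} = 1 ".format(i, inv, n))
--     return table, mult_pl_invers
-- ===== Notes on version B (the rewrite author's own statement) =====
-- stated objective: idiomatic
-- what changed: The table is built with a nested list comprehension and each modular inverse is computed directly with pow(i, -1, n) (extended gcd) under try/except ValueError, instead of collecting inverses from a second brute-force scan of every row.
import Mathlib
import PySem

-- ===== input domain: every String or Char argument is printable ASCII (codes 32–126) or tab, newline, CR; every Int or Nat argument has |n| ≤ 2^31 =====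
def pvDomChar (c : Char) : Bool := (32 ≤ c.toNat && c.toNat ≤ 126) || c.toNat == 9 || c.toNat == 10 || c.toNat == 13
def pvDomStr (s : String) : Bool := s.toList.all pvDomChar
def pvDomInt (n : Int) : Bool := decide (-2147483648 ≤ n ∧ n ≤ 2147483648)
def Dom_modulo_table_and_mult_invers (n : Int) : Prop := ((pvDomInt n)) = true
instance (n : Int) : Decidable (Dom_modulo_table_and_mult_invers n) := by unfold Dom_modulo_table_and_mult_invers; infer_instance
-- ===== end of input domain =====

-- B replaces A's inner brute-force scan for inverses by a direct pow(i,-1,n) (extended gcd)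
-- per row plus a comprehension-built table; objective: idiomatic (same return value).

-- "({}*{})%{} = 1 ".format(i, j, n), used by both Pythons verbatim
def pvFmt (i j n : Int) : String :=
  "(" ++ PySem.Int.toStr i ++ "*" ++ PySem.Int.toStr j ++ ")%" ++ PySem.Int.toStr n ++ " = 1 "

-- ===== PORT A =====
def modulo_table_and_mult_invers (n : Int) : List (List Int) × List String :=
  (PySem.List.pyRange 1 n 1).foldl
    (fun (st : List (List Int) × List String) i =>
      let inner := (PySem.List.pyRange 1 n 1).foldl
        (fun (rs : List Int × List String) j =>
          let c := PySem.Int.mod (i * j) n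
          let row := rs.1 ++ [c]
          if c = 1 then (row, rs.2 ++ [pvFmt i j n]) else (row, rs.2))
        (([] : List Int), st.2)
      (st.1 ++ [inner.1], inner.2))
    (([] : List (List Int)), ([] : List String))

-- ===== PORT B =====
-- Port of Python's pow(i, -1, n) via the extended gcd (what CPython computes):
-- exact for the calls Source B makes (1 ≤ i < n): 'none' iff pow raises ValueError,
-- otherwise the unique inverse in [0, n).
def pyPowInvMod (i n : Int) : Option Int :=
  if Int.gcd i n = 1 then some (PySem.Int.mod (Nat.gcdA i.toNat n.toNat) n) else none

def modulo_table_and_mult_invers_alt (n : Int) : List (List Int) × List String :=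
  ((PySem.List.pyRange 1 n 1).map
      (fun i => (PySem.List.pyRange 1 n 1).map (fun j => PySem.Int.mod (i * j) n)),
   (PySem.List.pyRange 1 n 1).foldl
    (fun (acc : List String) i =>
      match pyPowInvMod i n with
      | some v => acc ++ [pvFmt i v n]
      | none => acc) [])

-- ===== PRECONDITION & SPEC =====
def Spec_modulo_table_and_mult_invers (n : Int) (out : List (List Int) × List String) : Prop := out = modulo_table_and_mult_invers_alt n
instance (n : Int) (out : List (List Int) × List String) : Decidable (Spec_modulo_table_and_mult_invers n out) := by unfold Spec_modulo_table_and_mult_invers; infer_instance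

-- ===== CLAIM (what is proved, stated in full; the proofs are below) =====
def Claim_equal_modulo_table_and_mult_invers : Prop := ∀ (n : Int), Dom_modulo_table_and_mult_invers n → Spec_modulo_table_and_mult_invers n (modulo_table_and_mult_invers n)

-- ===== LEMMAS AND PROOFS =====

-- A's inner loop: row = map, strings = filtered appends.
theorem pv_inner (i n : Int) (l : List Int) (row : List Int) (s : List String) :
    l.foldl (fun (rs : List Int × List String) j =>
        let c := PySem.Int.mod (i * j) n
        let row := rs.1 ++ [c]
        if c = 1 then (row, rs.2 ++ [pvFmt i j n]) else (row, rs.2)) (row, s)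
      = (row ++ l.map (fun j => PySem.Int.mod (i * j) n),
         s ++ (l.filter (fun j => PySem.Int.mod (i * j) n = 1)).map (fun j => pvFmt i j n)) := by
  induction l generalizing row s with
  | nil => simp
  | cons x xs ih =>
    simp only [List.foldl_cons, List.map_cons, List.filter_cons]
    by_cases h : PySem.Int.mod (i * x) n = 1 <;> simp [h, ih]

-- generic: a fold appending one row and a batch of strings per element
theorem pv_pairfold (f : Int → List Int) (g : Int → List String)
    (l : List Int) (t : List (List Int)) (s : List String) :
    l.foldl (fun (st : List (List Int) × List String) i => (st.1 ++ [f i], st.2 ++ g i)) (t, s)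
      = (t ++ l.map f, s ++ l.flatMap g) := by
  induction l generalizing t s with
  | nil => simp
  | cons x xs ih =>
    simp only [List.foldl_cons]
    rw [ih]; simp

-- A's outer loop in closed form.
theorem pv_outer (n : Int) (l : List Int) (t : List (List Int)) (s : List String) :
    l.foldl (fun (st : List (List Int) × List String) i =>
      let inner := (PySem.List.pyRange 1 n 1).foldl
        (fun (rs : List Int × List String) j =>
          let c := PySem.Int.mod (i * j) n
          let row := rs.1 ++ [c]
          if c = 1 then (row, rs.2 ++ [pvFmt i j n]) else (row, rs.2))
        (([] : List Int), st.2)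
      (st.1 ++ [inner.1], inner.2)) (t, s)
    = (t ++ l.map (fun i => (PySem.List.pyRange 1 n 1).map (fun j => PySem.Int.mod (i * j) n)),
       s ++ l.flatMap (fun i => ((PySem.List.pyRange 1 n 1).filter
            (fun j => PySem.Int.mod (i * j) n = 1)).map (fun j => pvFmt i j n))) := by
  have hstep : (fun (st : List (List Int) × List String) i =>
      let inner := (PySem.List.pyRange 1 n 1).foldl
        (fun (rs : List Int × List String) j =>
          let c := PySem.Int.mod (i * j) n
          let row := rs.1 ++ [c]
          if c = 1 then (row, rs.2 ++ [pvFmt i j n]) else (row, rs.2))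
        (([] : List Int), st.2)
      (st.1 ++ [inner.1], inner.2))
      = (fun (st : List (List Int) × List String) i =>
          (st.1 ++ [(PySem.List.pyRange 1 n 1).map (fun j => PySem.Int.mod (i * j) n)],
           st.2 ++ ((PySem.List.pyRange 1 n 1).filter
            (fun j => PySem.Int.mod (i * j) n = 1)).map (fun j => pvFmt i j n))) := by
    funext st i
    simp [pv_inner]
  rw [hstep, pv_pairfold]

-- B's fold in closed form.
theorem pv_alt_fold (n : Int) (l : List Int) (s : List String) :
    l.foldl (fun (acc : List String) i =>
      match pyPowInvMod i n with
      | some v => acc ++ [pvFmt i v n]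
      | none => acc) s
    = s ++ l.flatMap (fun i =>
        match pyPowInvMod i n with
        | some v => [pvFmt i v n]
        | none => []) := by
  induction l generalizing s with
  | nil => simp
  | cons x xs ih =>
    simp only [List.foldl_cons, List.flatMap_cons]
    cases h : pyPowInvMod x n <;> simp [ih]

-- a nodup list whose unique p-element is a filters to [a]
theorem pv_filter_singleton {l : List Int} {p : Int → Bool} {a : Int}
    (hnd : l.Nodup) (ha : a ∈ l) (hpa : p a = true)
    (huniq : ∀ x ∈ l, p x = true → x = a) : l.filter p = [a] := by
  induction l with
  | nil => cases ha
  | cons x xs ih =>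
    rcases List.mem_cons.1 ha with h | h
    · subst h
      have : xs.filter p = [] := by
        apply List.filter_eq_nil_iff.2
        intro y hy hpy
        have := huniq y (List.mem_cons_of_mem _ hy) hpy
        exact absurd (this ▸ hy) (List.nodup_cons.1 hnd).1
      simp [hpa, this]
    · have hxa : x ≠ a := fun e => (List.nodup_cons.1 hnd).1 (e ▸ h)
      have hpx : p x = false := by
        by_contra hc
        exact hxa (huniq x (List.mem_cons_self) (by simpa using hc))
      simp [hpx]
      exact ih (List.nodup_cons.1 hnd).2 h (fun y hy hpy => huniq y (List.mem_cons_of_mem _ hy) hpy)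

-- no inverse when gcd ≠ 1
theorem pv_no_inv {i n : Int} (hn : 0 < n) (hg : Int.gcd i n ≠ 1) (j : Int) :
    PySem.Int.mod (i * j) n ≠ 1 := by
  rw [PySem.Int.mod_eq_emod_of_pos hn]
  intro h
  apply hg
  have hdi : (Int.gcd i n : Int) ∣ i := Int.gcd_dvd_left i n
  have hdn : (Int.gcd i n : Int) ∣ n := Int.gcd_dvd_right i n
  have hdvd : (Int.gcd i n : Int) ∣ 1 := by
    have : i * j % n = i * j - n * (i * j / n) := by
      rw [Int.emod_def]
    rw [h] at this
    rw [this]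
    exact dvd_sub (Dvd.dvd.mul_right hdi j) (Dvd.dvd.mul_right hdn _)
  exact_mod_cast Int.eq_one_of_dvd_one (by positivity) hdvd

-- Bezout: i * gcdA ≡ 1 (mod n) when gcd = 1, for 0 ≤ i, 0 ≤ n
theorem pv_bezout {i n : Int} (hi : 0 ≤ i) (hn : 0 ≤ n) (hg : Int.gcd i n = 1) :
    (i * Nat.gcdA i.toNat n.toNat) % n = 1 % n := by
  have hb := Nat.gcd_eq_gcd_ab i.toNat n.toNat
  have hgn : (Nat.gcd i.toNat n.toNat : Int) = 1 := by
    have h1 : i.natAbs = i.toNat := by omega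
    have h2 : n.natAbs = n.toNat := by omega
    have : Nat.gcd i.toNat n.toNat = 1 := by simpa [Int.gcd, h1, h2] using hg
    exact_mod_cast this
  rw [hgn] at hb
  rw [Int.toNat_of_nonneg hi, Int.toNat_of_nonneg hn] at hb
  have : i * Nat.gcdA i.toNat n.toNat = 1 + n * (- Nat.gcdB i.toNat n.toNat) := by
    rw [hb]; ring
  rw [this, Int.add_mul_emod_self_left]

-- the value pyPowInvMod returns really is the unique inverse in the range
theorem pv_inv_correct {i n : Int} (hi1 : 1 ≤ i) (hin : i < n) (hg : Int.gcd i n = 1) :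
    (PySem.Int.mod (i * PySem.Int.mod (Nat.gcdA i.toNat n.toNat) n) n = 1) ∧
    1 ≤ PySem.Int.mod (Nat.gcdA i.toNat n.toNat) n ∧
    PySem.Int.mod (Nat.gcdA i.toNat n.toNat) n < n := by
  have hn : 0 < n := by omega
  have hn2 : 1 < n := by omega
  rw [PySem.Int.mod_eq_emod_of_pos hn, PySem.Int.mod_eq_emod_of_pos hn]
  set g : Int := Nat.gcdA i.toNat n.toNat with hgdef
  have hmul : (i * (g % n)) % n = 1 := by
    have h1 : (i * (g % n)) % n = (i * g) % n := by
      rw [Int.mul_emod i (g % n) n, Int.emod_emod_of_dvd _ dvd_rfl, ← Int.mul_emod]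
    rw [h1, pv_bezout (le_trans zero_le_one hi1) (le_of_lt hn) hg,
      Int.emod_eq_of_lt zero_le_one hn2]
  refine ⟨hmul, ?_, Int.emod_lt_of_pos _ hn⟩
  rcases lt_or_eq_of_le (Int.emod_nonneg g (ne_of_gt hn)) with h | h
  · omega
  · exfalso
    rw [← h] at hmul
    simp at hmul

-- uniqueness of the inverse inside [1, n)
theorem pv_inv_unique {i n a j : Int}
    (ha0 : 0 ≤ a) (han : a < n) (hj0 : 0 ≤ j) (hjn : j < n)
    (hma : (i * a) % n = 1) (hmj : (i * j) % n = 1) : j = a := by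
  have h1 : (j * (i * a)) % n = j % n := by
    rw [Int.mul_emod j (i * a) n, hma, mul_one, Int.emod_emod_of_dvd _ dvd_rfl]
  have h2 : (a * (i * j)) % n = a % n := by
    rw [Int.mul_emod a (i * j) n, hmj, mul_one, Int.emod_emod_of_dvd _ dvd_rfl]
  have h3 : j * (i * a) = a * (i * j) := by ring
  rw [h3, h2] at h1
  rw [Int.emod_eq_of_lt ha0 han, Int.emod_eq_of_lt hj0 hjn] at h1
  omega

-- pointwise: A's per-i string list = B's per-i string list
theorem pv_strings_eq {i n : Int} (hi1 : 1 ≤ i) (hin : i < n) :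
    ((PySem.List.pyRange 1 n 1).filter
      (fun j => PySem.Int.mod (i * j) n = 1)).map (fun j => pvFmt i j n)
    = (match pyPowInvMod i n with
       | some v => [pvFmt i v n]
       | none => []) := by
  have hn : 0 < n := by omega
  unfold pyPowInvMod
  by_cases hg : Int.gcd i n = 1
  · simp only [hg, reduceIte]
    obtain ⟨hmul, ha1, han⟩ := pv_inv_correct hi1 hin hg
    set a := PySem.Int.mod (Nat.gcdA i.toNat n.toNat) n with hadef
    have hfil : (PySem.List.pyRange 1 n 1).filter
        (fun j => PySem.Int.mod (i * j) n = 1) = [a] := by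
      apply pv_filter_singleton (PySem.List.nodup_pyRange_one 1 n)
      · exact PySem.List.mem_pyRange_one.2 ⟨ha1, han⟩
      · simpa using hmul
      · intro x hx hpx
        have hx' := PySem.List.mem_pyRange_one.1 hx
        have hpx' : PySem.Int.mod (i * x) n = 1 := by simpa using hpx
        rw [PySem.Int.mod_eq_emod_of_pos hn] at hpx' hmul
        exact pv_inv_unique (by omega) (by omega) (by omega) hx'.2 hmul hpx'
    rw [hfil]; simp
  · rw [if_neg hg]
    have : (PySem.List.pyRange 1 n 1).filter
        (fun j => PySem.Int.mod (i * j) n = 1) = [] := by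
      apply List.filter_eq_nil_iff.2
      intro j _ hpj
      exact absurd (by simpa using hpj) (pv_no_inv hn hg j)
    rw [this]; simp

-- ===== VERDICT (by name: the statement is the Claim_ definition above) =====
theorem modulo_table_and_mult_invers_spec : Claim_equal_modulo_table_and_mult_invers := by
  intro n _
  unfold Spec_modulo_table_and_mult_invers modulo_table_and_mult_invers modulo_table_and_mult_invers_alt
  rw [pv_outer, pv_alt_fold]
  simp only [List.nil_append]
  refine congrArg _ ?_
  apply List.flatMap_congr
  intro i hi
  have hi' := PySem.List.mem_pyRange_one.1 hi
  exact pv_strings_eq hi'.1 hi'.2
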